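-- pv_equiv track=rewrite | github.com/alexjharrison/aoc-runner-python | problems/2022/day8/p1.py | num_visible_from_top
-- ===== SOURCE A (Python) =====
-- Coord = set[tuple[int, int]]
--
-- def num_visible_from_top(col_idx: int, col: str) -> Coord:
--     matches = set()
--     highest = -1
--     for row_idx, char in enumerate(col):
--         num = int(char)
--         coords = (row_idx, col_idx)
--         if num > highest:
--             matches.add(coords)
--             highest = num
--
--     return matches
-- ===== SOURCE B (Python) =====
-- def num_visible_from_top(col_idx: int, col: str):
--     digits = [int(c) for c in col]
--     return {(i, col_idx)
--             for i, d in enumerate(digits)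
--             if all(e < d for e in digits[:i])}
-- ===== Notes on version B (the rewrite author's own statement) =====
-- stated objective: alternative
-- what changed: B replaces the stateful running-maximum loop by a declarative characterisation: a cell is visible iff it is strictly taller than every cell before it, computed as a set comprehension over prefixes.
import Mathlib
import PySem

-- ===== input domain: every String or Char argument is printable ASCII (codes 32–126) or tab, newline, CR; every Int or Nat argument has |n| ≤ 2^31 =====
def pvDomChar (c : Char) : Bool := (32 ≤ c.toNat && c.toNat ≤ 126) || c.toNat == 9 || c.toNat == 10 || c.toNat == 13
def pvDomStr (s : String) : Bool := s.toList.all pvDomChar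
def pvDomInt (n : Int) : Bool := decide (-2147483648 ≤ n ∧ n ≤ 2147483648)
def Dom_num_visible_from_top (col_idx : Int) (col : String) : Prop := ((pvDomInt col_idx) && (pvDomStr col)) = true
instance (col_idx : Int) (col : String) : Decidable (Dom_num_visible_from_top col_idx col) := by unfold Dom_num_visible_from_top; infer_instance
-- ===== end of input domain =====

-- B replaces A's stateful running-maximum loop by a declarative prefix characterisation (a cell is
-- visible iff strictly taller than every earlier cell); same results, not faster (O(n^2) vs O(n)).

-- ===== PORT A =====
-- literal transliteration of A: running 'highest', set.add when the digit beats it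
def num_visible_from_top (col_idx : Int) (col : String) : List (Int × Int) :=
  ((PySem.List.enumerate col.toList 0).foldl
    (fun (st : PySem.Set (Int × Int) × Int) (p : Int × Char) =>
      let num := (PySem.Int.ofStr? (String.ofList [p.2])).getD 0
      let coords := (p.1, col_idx)
      if num > st.2 then (PySem.Set.add st.1 coords, num) else st)
    (PySem.Set.empty, -1)).1

-- ===== PORT B =====
-- literal transliteration of B: digits table, then a set comprehension selecting the indices
-- strictly taller than every element of their prefix (digits[:i] = take i, exact since i ≥ 0)
def num_visible_from_top_alt (col_idx : Int) (col : String) : List (Int × Int) :=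
  let digits := col.toList.map (fun c => (PySem.Int.ofStr? (String.ofList [c])).getD 0)
  PySem.Set.ofList
    (((PySem.List.enumerate digits 0).filter
        (fun p => (digits.take p.1.toNat).all (fun e => decide (e < p.2)))).map
      (fun p => (p.1, col_idx)))

-- ===== PRECONDITION & SPEC =====
-- Pre_ excludes exactly the inputs on which A raises ValueError: int(char) fails unless every
-- character of col is a decimal digit.
def Pre_num_visible_from_top (col_idx : Int) (col : String) : Prop :=
  col.toList.all PySem.Chars.isdigit = true
instance (col_idx : Int) (col : String) : Decidable (Pre_num_visible_from_top col_idx col) := by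
  unfold Pre_num_visible_from_top; infer_instance

def pvWitness_num_visible_from_top : Int × String := (3, "302373")

def Spec_num_visible_from_top (col_idx : Int) (col : String) (out : List (Int × Int)) : Prop := out = num_visible_from_top_alt col_idx col
instance (col_idx : Int) (col : String) (out : List (Int × Int)) : Decidable (Spec_num_visible_from_top col_idx col out) := by unfold Spec_num_visible_from_top; infer_instance

-- ===== CLAIM (what is proved, stated in full; the proofs are below) =====
def Claim_equal_num_visible_from_top : Prop := ∀ (col_idx : Int) (col : String), Dom_num_visible_from_top col_idx col → Pre_num_visible_from_top col_idx col → Spec_num_visible_from_top col_idx col (num_visible_from_top col_idx col)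

-- ===== LEMMAS AND PROOFS =====

-- common shape of both results: walk the digit list keeping the processed prefix, emit (i, cidx)
-- when the digit beats every element of the prefix
def visSel (cidx : Int) (pre : List Int) (i : Int) : List Int → List (Int × Int)
  | [] => []
  | d :: t =>
      (if pre.all (fun e => decide (e < d)) then [(i, cidx)] else []) ++
        visSel cidx (pre ++ [d]) (i + 1) t

theorem pyIsdigit_isDigit (c : Char) (h : PySem.Chars.isdigit c = true) : c.isDigit = true := by
  simp [PySem.Chars.isdigit, Char.le_def] at h
  simp [Char.isDigit]
  exact h

theorem digit_cases (c : Char) (h : c.isDigit) :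
    c = '0' ∨ c = '1' ∨ c = '2' ∨ c = '3' ∨ c = '4' ∨ c = '5' ∨ c = '6' ∨ c = '7' ∨ c = '8' ∨ c = '9' := by
  simp [Char.isDigit] at h
  obtain ⟨h1, h2⟩ := h
  rw [UInt32.le_iff_toNat_le] at h1 h2
  simp at h1 h2
  have hv : c.val.toNat = c.toNat := rfl
  have h3 : c.toNat = 48 ∨ c.toNat = 49 ∨ c.toNat = 50 ∨ c.toNat = 51 ∨ c.toNat = 52 ∨ c.toNat = 53 ∨ c.toNat = 54 ∨ c.toNat = 55 ∨ c.toNat = 56 ∨ c.toNat = 57 := by omega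
  rw [← hv] at h3
  rcases h3 with h3|h3|h3|h3|h3|h3|h3|h3|h3|h3 <;>
    simp_all [Char.ext_iff, ← UInt32.toNat_inj]

theorem ofStr_digit (c : Char) (h : c.isDigit) :
    PySem.Int.ofStr? (String.ofList [c]) = some ((c.toNat : Int) - 48) := by
  rcases digit_cases c h with h|h|h|h|h|h|h|h|h|h <;> subst h <;> decide

theorem digit_val_nonneg (c : Char) (h : c.isDigit) :
    0 ≤ (PySem.Int.ofStr? (String.ofList [c])).getD 0 := by
  rw [ofStr_digit c h]
  have : 48 ≤ c.toNat := by
    simp [Char.isDigit] at h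
    obtain ⟨h1, _⟩ := h
    rw [UInt32.le_iff_toNat_le] at h1
    simpa using h1
  simp; omega

-- A's loop with accumulator acc, processed prefix pre (so highest = pre.foldl max (-1)) equals
-- acc ++ the declarative selection
theorem foldA (cidx : Int) (t : List Int) (pre : List Int) (acc : List (Int × Int))
    (hacc : ∀ q ∈ acc, q.1 < (pre.length : Int))
    (ht : ∀ x ∈ t, 0 ≤ x) :
    ((PySem.List.enumerate t (pre.length : Int)).foldl
      (fun (st : PySem.Set (Int × Int) × Int) (p : Int × Int) =>
        if p.2 > st.2 then (PySem.Set.add st.1 (p.1, cidx), p.2) else st)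
      (acc, pre.foldl max (-1))).1
    = acc ++ visSel cidx pre (pre.length : Int) t := by
  induction t generalizing pre acc with
  | nil => simp [PySem.List.enumerate_nil, visSel]
  | cons d rest ih =>
    rw [PySem.List.enumerate_cons, List.foldl_cons]
    have hd0 : 0 ≤ d := ht d (by simp)
    by_cases h : d > pre.foldl max (-1)
    · -- visible: all of pre is below d
      have hall : pre.all (fun e => decide (e < d)) = true := by
        simp only [List.all_eq_true, decide_eq_true_eq]
        intro e he
        exact lt_of_le_of_lt ((PySem.List.le_foldl_max pre (-1)).2 e he) h
      have hnotmem : ((pre.length : Int), cidx) ∉ acc := by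
        intro hm
        have := hacc _ hm
        simp at this
      simp only [h, if_pos]
      rw [PySem.Set.add_of_not_mem hnotmem]
      have hmax : (pre ++ [d]).foldl max (-1) = d := by
        rw [List.foldl_append]
        simp [max_eq_right (le_of_lt h)]
      have hlen : ((pre ++ [d]).length : Int) = (pre.length : Int) + 1 := by
        simp
      have := ih (pre ++ [d]) (acc ++ [((pre.length : Int), cidx)])
        (by intro q hq
            rcases List.mem_append.mp hq with h1 | h1
            · have := hacc _ h1; simp; omega
            · simp at h1; subst h1; simp)
        (fun x hx => ht x (by simp [hx]))
      rw [hmax, hlen] at this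
      rw [this]
      simp [visSel, hall]
    · -- not visible: some element of pre (or the -1 start being beaten is impossible, d ≥ 0) ≥ d
      have hle : d ≤ pre.foldl max (-1) := not_lt.mp h
      have hall : pre.all (fun e => decide (e < d)) = false := by
        rcases PySem.List.foldl_max_mem pre (-1) with h2 | h2
        · omega
        · simp only [List.all_eq_false]
          exact ⟨_, h2, by simp; omega⟩
      simp only [h, if_neg, not_false_eq_true]
      have hmax : (pre ++ [d]).foldl max (-1) = pre.foldl max (-1) := by
        rw [List.foldl_append]
        simp [max_eq_left hle]
      have hlen : ((pre ++ [d]).length : Int) = (pre.length : Int) + 1 := by simp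
      have := ih (pre ++ [d]) acc
        (by intro q hq; have := hacc _ hq; simp; omega)
        (fun x hx => ht x (by simp [hx]))
      rw [hmax, hlen] at this
      rw [this]
      simp [visSel, hall]

-- B's filter/map over the enumerated digits equals the same declarative selection
theorem foldB (cidx : Int) (t : List Int) (pre : List Int) :
    ((PySem.List.enumerate t (pre.length : Int)).filter
        (fun p => ((pre ++ t).take p.1.toNat).all (fun e => decide (e < p.2)))).map
      (fun p => (p.1, cidx))
    = visSel cidx pre (pre.length : Int) t := by
  induction t generalizing pre with
  | nil => simp [PySem.List.enumerate_nil, visSel]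
  | cons d rest ih =>
    rw [PySem.List.enumerate_cons, List.filter_cons]
    have htake : ((pre ++ d :: rest).take ((pre.length : Int)).toNat) = pre := by
      simp
    have hsplit : pre ++ d :: rest = (pre ++ [d]) ++ rest := by simp
    have hlen : ((pre ++ [d]).length : Int) = (pre.length : Int) + 1 := by simp
    have ihr := ih (pre ++ [d])
    rw [hlen] at ihr
    by_cases hall : pre.all (fun e => decide (e < d)) = true
    · simp only [htake, hall, if_pos, List.map_cons]
      rw [hsplit, ihr]
      simp [visSel, hall]
    · simp only [htake, hall, if_neg, Bool.not_eq_true]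
      rw [hsplit, ihr]
      simp [visSel, hall]

theorem enumerate_map {α β : Type} (f : α → β) (l : List α) (s : Int) :
    PySem.List.enumerate (l.map f) s = (PySem.List.enumerate l s).map (fun p => (p.1, f p.2)) := by
  induction l generalizing s with
  | nil => simp [PySem.List.enumerate_nil]
  | cons x t ih => simp [PySem.List.enumerate_cons, ih]

-- ===== VERDICT (by name: the statement is the Claim_ definition above) =====
theorem num_visible_from_top_spec : Claim_equal_num_visible_from_top := by
  intro cidx col _hdom hpre
  unfold Spec_num_visible_from_top num_visible_from_top num_visible_from_top_alt
  set digits := col.toList.map (fun c => (PySem.Int.ofStr? (String.ofList [c])).getD 0) with hdig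
  have hnn : ∀ x ∈ digits, 0 ≤ x := by
    intro x hx
    rw [hdig] at hx
    obtain ⟨c, hc, rfl⟩ := List.mem_map.mp hx
    exact digit_val_nonneg c (pyIsdigit_isDigit c ((List.all_eq_true.mp hpre) c hc))
  -- A's side: convert the char fold into the digit fold, then apply foldA with pre = []
  have hA : ((PySem.List.enumerate col.toList 0).foldl
      (fun (st : PySem.Set (Int × Int) × Int) (p : Int × Char) =>
        let num := (PySem.Int.ofStr? (String.ofList [p.2])).getD 0
        let coords := (p.1, cidx)
        if num > st.2 then (PySem.Set.add st.1 coords, num) else st)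
      (PySem.Set.empty, -1)).1 = visSel cidx [] 0 digits := by
    have hfold : ((PySem.List.enumerate digits (([] : List Int).length : Int)).foldl
        (fun (st : PySem.Set (Int × Int) × Int) (p : Int × Int) =>
          if p.2 > st.2 then (PySem.Set.add st.1 (p.1, cidx), p.2) else st)
        (([] : List (Int × Int)), ([] : List Int).foldl max (-1))).1
        = [] ++ visSel cidx [] (([] : List Int).length : Int) digits :=
      foldA cidx digits [] [] (by simp) hnn
    simp only [List.length_nil, Nat.cast_zero, List.foldl_nil, List.nil_append] at hfold
    rw [← hfold, hdig, enumerate_map, List.foldl_map]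
    rfl
  -- B's side: foldB with pre = [], and the built list is already duplicate-free
  have hB : (((PySem.List.enumerate digits 0).filter
        (fun p => (digits.take p.1.toNat).all (fun e => decide (e < p.2)))).map
      (fun p => (p.1, cidx))) = visSel cidx [] 0 digits := by
    have := foldB cidx digits []
    simpa using this
  have hnodup : (((PySem.List.enumerate digits 0).filter
        (fun p => (digits.take p.1.toNat).all (fun e => decide (e < p.2)))).map
      (fun p => (p.1, cidx))).Nodup := by
    have h1 : (PySem.List.enumerate digits 0).Pairwise (fun p q => p.1 < q.1) :=
      PySem.List.pairwise_lt_enumerate digits 0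
    have h2 := List.Pairwise.filter
      (p := fun p => (digits.take p.1.toNat).all (fun e => decide (e < p.2))) h1
    exact h2.map _ (by intro a b hab; simp [Prod.ext_iff]; omega)
  rw [hA]
  show visSel cidx [] 0 digits =
    PySem.Set.ofList (((PySem.List.enumerate digits 0).filter
        (fun p => (digits.take p.1.toNat).all (fun e => decide (e < p.2)))).map
      (fun p => (p.1, cidx)))
  rw [PySem.Set.ofList_eq_self_of_nodup _ hnodup, hB]
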